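-- pv_equiv track=rewrite | github.com/Laplx/ARC | NVARC-main/SDG/scripts/utils_barc.py | clean_concepts
-- ===== SOURCE A (Python) =====
-- def clean_comments(text):
--     text = text.replace("sprites", "objects")
--     text = text.replace("sprite", "object")
--     lines = text.split("\n")
--     cleaned_lines = []
--     for line in lines:
--         line = line.strip()
--         if line.startswith("#"):
--             comment = line[1:].strip()
--             if comment:
--                 cleaned_lines.append(comment)
--     return cleaned_lines
--
-- def clean_concepts(text):
--     concepts = []
--     text = ",".join(clean_comments(text))
--     for concept in text.split(","):
--         concept = concept.strip()
--         if concept: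
--             concepts.append(concept)
--     return concepts
-- ===== SOURCE B (Python) =====
-- def clean_concepts(text):
--     text = text.replace("sprites", "objects").replace("sprite", "object")
--     concepts = []
--     for line in text.split("\n"):
--         line = line.strip()
--         if line.startswith("#"):
--             for token in line[1:].strip().split(","):
--                 token = token.strip()
--                 if token:
--                     concepts.append(token)
--     return concepts
-- ===== Notes on version B (the rewrite author's own statement) =====
-- stated objective: simpler
-- what changed: Inlines the comment extraction into one nested traversal that splits each comment body on the comma separator directly, removing A's intermediate comment list and the join-then-resplit string round-trip.
import Mathlib
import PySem

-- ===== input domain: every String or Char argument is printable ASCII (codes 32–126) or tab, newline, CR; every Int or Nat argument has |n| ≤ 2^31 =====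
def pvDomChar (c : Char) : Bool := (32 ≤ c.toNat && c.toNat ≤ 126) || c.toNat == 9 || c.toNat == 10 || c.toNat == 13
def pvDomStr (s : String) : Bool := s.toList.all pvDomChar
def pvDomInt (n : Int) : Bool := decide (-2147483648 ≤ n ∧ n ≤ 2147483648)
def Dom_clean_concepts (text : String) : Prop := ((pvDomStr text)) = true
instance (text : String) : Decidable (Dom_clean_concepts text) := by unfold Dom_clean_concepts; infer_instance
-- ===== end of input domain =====

-- B replaces A's build-comment-list / ','-join / re-split round trip by one nested traversal
-- that splits each comment body on ',' directly (objective: simpler).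

-- ===== PORT A =====
-- shared helper: s.split(sep) for a non-empty sep, at the String level
def pySplit (s sep : String) : List String :=
  (PySem.Chars.splitOn s.toList sep.toList).map String.ofList

def clean_comments (text : String) : List String :=
  let text := PySem.Str.replace text "sprites" "objects"
  let text := PySem.Str.replace text "sprite" "object"
  let lines := pySplit text "\n"
  lines.foldl (fun cleaned_lines line =>
    let line := PySem.Str.strip line
    if PySem.Str.startswith line "#" then
      let comment := PySem.Str.strip (PySem.Str.slice line (some 1) none)
      if comment ≠ "" then cleaned_lines ++ [comment] else cleaned_lines
    else cleaned_lines) []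

def clean_concepts (text : String) : List String :=
  let text := PySem.Str.join "," (clean_comments text)
  (pySplit text ",").foldl (fun concepts concept =>
    let concept := PySem.Str.strip concept
    if concept ≠ "" then concepts ++ [concept] else concepts) []

-- ===== PORT B =====
def clean_concepts_alt (text : String) : List String :=
  let text := PySem.Str.replace (PySem.Str.replace text "sprites" "objects") "sprite" "object"
  (pySplit text "\n").foldl (fun concepts line =>
    let line := PySem.Str.strip line
    if PySem.Str.startswith line "#" then
      (pySplit (PySem.Str.strip (PySem.Str.slice line (some 1) none)) ",").foldl
        (fun concepts token =>
          let token := PySem.Str.strip token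
          if token ≠ "" then concepts ++ [token] else concepts) concepts
    else concepts) []

-- ===== PRECONDITION & SPEC =====
def Spec_clean_concepts (text : String) (out : List String) : Prop := out = clean_concepts_alt text
instance (text : String) (out : List String) : Decidable (Spec_clean_concepts text out) := by unfold Spec_clean_concepts; infer_instance

-- ===== CLAIM (what is proved, stated in full; the proofs are below) =====
def Claim_equal_clean_concepts : Prop := ∀ (text : String), Dom_clean_concepts text → Spec_clean_concepts text (clean_concepts text)

-- ===== LEMMAS AND PROOFS =====

-- chars-level reference pieces
def pvF (parts : List (List Char)) : List (List Char) :=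
  (parts.filter (fun t => PySem.Chars.strip t ≠ [])).map PySem.Chars.strip

def pvGC (ln : List Char) : List (List Char) :=
  if PySem.Chars.startswith (PySem.Chars.strip ln) ['#'] then
    (if PySem.Chars.strip (PySem.Chars.strip ln).tail = [] then []
     else [PySem.Chars.strip (PySem.Chars.strip ln).tail])
  else []

def pvGB (ln : List Char) : List (List Char) :=
  if PySem.Chars.startswith (PySem.Chars.strip ln) ['#'] then
    pvF ((PySem.Chars.strip (PySem.Chars.strip ln).tail).splitOn ',')
  else []





lemma pv_go_single (c : Char) : ∀ (fuel : Nat) (l cur : List Char) (acc : List (List Char)),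
    l.length < fuel →
    PySem.Chars.splitOn.go [c] fuel l cur acc
      = acc.reverse ++ (l.splitOn c).modifyHead (cur.reverse ++ ·) := by
  intro fuel
  induction fuel with
  | zero => intro l cur acc h; omega
  | succ n ih =>
    intro l cur acc h
    cases l with
    | nil => simp [PySem.Chars.splitOn.go, List.splitOn]
    | cons x xs =>
      rw [PySem.Chars.splitOn.go]
      by_cases hx : x = c
      · have hpf : ([c].isPrefixOf (x :: xs)) = true := by simp [List.isPrefixOf, hx.symm]
        simp only [hpf, if_true]
        rw [ih _ _ _ (by simp at h ⊢; omega)]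
        simp [List.splitOn, List.splitOnP_cons, hx]
        exact congrFun List.modifyHead_id _
      · have hpf : ([c].isPrefixOf (x :: xs)) = false := by
          simp [List.isPrefixOf]; exact fun hc => absurd hc.symm hx
        simp only [hpf, Bool.false_eq_true, if_false]
        rw [ih _ _ _ (by simp at h ⊢; omega)]
        obtain ⟨t, ts, hts⟩ : ∃ t ts, xs.splitOn c = t :: ts := by
          rcases hxs : xs.splitOn c with _ | ⟨t, ts⟩
          · exact absurd hxs (List.splitOnP_ne_nil _ _)
          · exact ⟨t, ts, rfl⟩
        simp only [List.splitOn] at hts ⊢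
        simp [List.splitOnP_cons, hx, hts]

lemma pv_splitOn_single (c : Char) (s : List Char) :
    PySem.Chars.splitOn s [c] = s.splitOn c := by
  show PySem.Chars.splitOn.go [c] (s.length + 1) s [] [] = _
  rw [pv_go_single c (s.length+1) s [] [] (by omega)]
  simp only [List.reverse_nil, List.nil_append]
  exact congrFun List.modifyHead_id _

lemma pv_splitOn_sep_append (c : Char) : ∀ (a b : List Char),
    (a ++ c :: b).splitOn c = a.splitOn c ++ b.splitOn c := by
  intro a
  induction a with
  | nil => intro b; simp [List.splitOn, List.splitOnP_cons]
  | cons x xs ih =>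
    intro b
    have ihb := ih b
    simp only [List.splitOn] at ihb ⊢
    rw [List.cons_append, List.splitOnP_cons, List.splitOnP_cons]
    by_cases hx : x = c
    · simp [hx, ihb]
    · obtain ⟨t, ts, hts⟩ : ∃ t ts, List.splitOnP (fun y => y == c) xs = t :: ts := by
        rcases hxs : List.splitOnP (fun y => y == c) xs with _ | ⟨t, ts⟩
        · exact absurd hxs (List.splitOnP_ne_nil _ _)
        · exact ⟨t, ts, rfl⟩
      simp [hx, ihb, hts]

lemma pv_intercalate_splitOn (c : Char) : ∀ (C : List (List Char)), C ≠ [] →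
    (List.intercalate [c] C).splitOn c = C.flatMap (·.splitOn c) := by
  intro C
  induction C with
  | nil => intro h; exact absurd rfl h
  | cons x xs ih =>
    intro _
    cases xs with
    | nil => simp [List.intercalate]
    | cons y ys =>
      have : List.intercalate [c] (x :: y :: ys) = x ++ c :: List.intercalate [c] (y :: ys) := by
        simp [List.intercalate, List.intersperse]
      rw [this, pv_splitOn_sep_append, ih (by simp)]
      simp


lemma pv_foldl_if_append {α β : Type} (p : α → Prop) [DecidablePred p] (f : α → β)
    (l : List α) (acc : List β) :
    l.foldl (fun acc x => if p x then acc ++ [f x] else acc) acc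
      = acc ++ (l.filter (fun x => decide (p x))).map f := by
  induction l generalizing acc with
  | nil => simp
  | cons x xs ih =>
    simp only [List.foldl_cons, List.filter_cons]
    by_cases hx : p x <;> simp [hx, ih]

lemma pv_strip_nil : PySem.Chars.strip [] = [] := rfl

lemma pv_toList_hash : "#".toList = ['#'] := rfl
lemma pv_toList_nl : "\n".toList = ['\n'] := rfl
lemma pv_toList_comma : ",".toList = [','] := rfl

lemma pv_F_append (a b : List (List Char)) : pvF (a ++ b) = pvF a ++ pvF b := by
  simp [pvF]

lemma pv_F_flatMap {α : Type} (l : List α) (g : α → List (List Char)) :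
    pvF (l.flatMap g) = l.flatMap (fun x => pvF (g x)) := by
  induction l with
  | nil => simp [pvF]
  | cons x xs ih => simp [List.flatMap_cons, pv_F_append, ih]

lemma pv_central (C : List (List Char)) :
    pvF ((List.intercalate [','] C).splitOn ',') = C.flatMap (fun b => pvF (b.splitOn ',')) := by
  cases C with
  | nil => simp [List.intercalate, List.splitOn, List.splitOnP_nil, pvF, pv_strip_nil]
  | cons x xs =>
    rw [pv_intercalate_splitOn ',' (x :: xs) (by simp)]
    exact pv_F_flatMap _ _


lemma pv_gc_gb (ln : List Char) :
    (pvGC ln).flatMap (fun b => pvF (b.splitOn ',')) = pvGB ln := by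
  unfold pvGC pvGB
  by_cases hsw : PySem.Chars.startswith (PySem.Chars.strip ln) ['#'] = true
  · simp only [hsw, if_true]
    by_cases hb : PySem.Chars.strip (PySem.Chars.strip ln).tail = []
    · simp [hb, List.splitOn, List.splitOnP_nil, pvF, pv_strip_nil]
    · simp [hb]
  · simp [hsw]


lemma pv_comments_eq (text : String) :
    clean_comments text
      = ((PySem.Chars.splitOn (PySem.Str.replace (PySem.Str.replace text "sprites" "objects") "sprite" "object").toList ['\n']).flatMap pvGC).map String.ofList := by
  unfold clean_comments pySplit
  simp only [pv_toList_nl]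
  rw [List.foldl_map]
  rw [PySem.List.foldl_congr_mem _ _ (fun acc l => acc ++ (pvGC l).map String.ofList) _ ?_]
  · rw [PySem.List.foldl_append_eq_flatMap, List.map_flatMap]
    simp
  · intro acc l _
    simp only [pvGC, PySem.Str.strip, PySem.Str.startswith, PySem.Str.slice,
      String.toList_ofList, PySem.Chars.slice_eq_listSlice, PySem.List.slice_from_one]
    by_cases hsw : PySem.Chars.startswith (PySem.Chars.strip l) ['#'] = true
    · simp only [hsw, if_true]
      by_cases hb : PySem.Chars.strip (PySem.Chars.strip l).tail = [] <;> simp [hb, hsw]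
    · simp [hsw]


lemma pv_A_eq (text : String) :
    clean_concepts text
      = (pvF ((List.intercalate [','] ((PySem.Chars.splitOn (PySem.Str.replace (PySem.Str.replace text "sprites" "objects") "sprite" "object").toList ['\n']).flatMap pvGC)).splitOn ',')).map String.ofList := by
  unfold clean_concepts pySplit
  simp only []
  rw [pv_comments_eq]
  simp only [pv_toList_comma]
  have hjoin : (PySem.Str.join "," (((PySem.Chars.splitOn (PySem.Str.replace (PySem.Str.replace text "sprites" "objects") "sprite" "object").toList ['\n']).flatMap pvGC).map String.ofList)).toList
      = List.intercalate [','] ((PySem.Chars.splitOn (PySem.Str.replace (PySem.Str.replace text "sprites" "objects") "sprite" "object").toList ['\n']).flatMap pvGC) := by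
    rw [PySem.Str.toList_join]
    simp [PySem.Chars.join, List.map_map, Function.comp_def]
  rw [hjoin, pv_splitOn_single]
  rw [List.foldl_map]
  rw [PySem.List.foldl_congr_mem _ _ (fun acc t => if PySem.Chars.strip t ≠ [] then acc ++ [String.ofList (PySem.Chars.strip t)] else acc) _ ?_]
  · rw [pv_foldl_if_append (fun t => PySem.Chars.strip t ≠ []) (fun t => String.ofList (PySem.Chars.strip t))]
    simp [pvF]
  · intro acc t _
    simp only [PySem.Str.strip, String.toList_ofList]
    by_cases h : PySem.Chars.strip t = [] <;> simp [h]


lemma pv_B_eq (text : String) :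
    clean_concepts_alt text
      = ((PySem.Chars.splitOn (PySem.Str.replace (PySem.Str.replace text "sprites" "objects") "sprite" "object").toList ['\n']).flatMap pvGB).map String.ofList := by
  unfold clean_concepts_alt pySplit
  simp only [pv_toList_nl, pv_toList_comma]
  rw [List.foldl_map]
  rw [PySem.List.foldl_congr_mem _ _ (fun acc l => acc ++ (pvGB l).map String.ofList) _ ?_]
  · rw [PySem.List.foldl_append_eq_flatMap, List.map_flatMap]
    simp
  · intro acc l _
    simp only [pvGB, PySem.Str.strip, PySem.Str.startswith, PySem.Str.slice,
      String.toList_ofList, PySem.Chars.slice_eq_listSlice, PySem.List.slice_from_one,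
      pv_toList_hash]
    by_cases hsw : PySem.Chars.startswith (PySem.Chars.strip l) ['#'] = true
    · simp only [hsw, if_true]
      rw [List.foldl_map]
      rw [PySem.List.foldl_congr_mem _ _ (fun acc t => if PySem.Chars.strip t ≠ [] then acc ++ [String.ofList (PySem.Chars.strip t)] else acc) _ ?_]
      · rw [pv_foldl_if_append (fun t => PySem.Chars.strip t ≠ []) (fun t => String.ofList (PySem.Chars.strip t))]
        rw [pv_splitOn_single]
        simp [pvF]
      · intro acc2 t _
        simp only [String.toList_ofList]
        by_cases h : PySem.Chars.strip t = [] <;> simp [h]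
    · simp [hsw]


-- ===== VERDICT (by name: the statement is the Claim_ definition above) =====
theorem clean_concepts_spec : Claim_equal_clean_concepts := by
  intro text _
  show clean_concepts text = clean_concepts_alt text
  rw [pv_A_eq, pv_B_eq, pv_central]
  rw [List.flatMap_assoc]
  simp only [pv_gc_gb]
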